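-- pv_equiv track=rewrite | github.com/whitepaper2/algoDiary | algo-improve/0x16-trieTree.py | getPrefixCnts2
-- ===== SOURCE A (Python) =====
-- from collections import defaultdict, Counter
--
-- def getPrefixCnts2(words, prefix):
--     """
--     构造前缀字典树，叶子节点的数量相加
--     :param words:
--     :param prefix:
--     :return:
--     """
--
--     class TrieCntNode(object):
--
--         def __init__(self):
--             self.children = defaultdict(TrieCntNode)
--             self.cnts = 0
--
--     class TrieCntTree(object):
--
--         def __init__(self):
--             self.root = TrieCntNode()
--
--         def insert(self, word):
--             cur = self.root
--             for w in word:
--                 cur = cur.children[w]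
--             # 叶子节点+1
--             cur.cnts += 1
--
--         def getCnts(self, word):
--             res = 0
--             cur = self.root
--             for w in word:
--                 child = cur.children.get(w)
--                 if child is None:
--                     break
--                 res += child.cnts
--                 cur = child
--             return res
--
--     tree = TrieCntTree()
--     for w in words:
--         tree.insert(w)
--
--     return tree.getCnts(prefix)
-- ===== SOURCE B (Python) =====
-- def getPrefixCnts2(words, prefix):
--     return sum(1 for w in words if w and prefix.startswith(w))
-- ===== Notes on version B (the rewrite author's own statement) =====
-- stated objective: faster
-- what changed: Replaces building a character trie and walking the query through it with a single pass over the words counting those that are non-empty prefixes of the query via str.startswith.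
import Mathlib
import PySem

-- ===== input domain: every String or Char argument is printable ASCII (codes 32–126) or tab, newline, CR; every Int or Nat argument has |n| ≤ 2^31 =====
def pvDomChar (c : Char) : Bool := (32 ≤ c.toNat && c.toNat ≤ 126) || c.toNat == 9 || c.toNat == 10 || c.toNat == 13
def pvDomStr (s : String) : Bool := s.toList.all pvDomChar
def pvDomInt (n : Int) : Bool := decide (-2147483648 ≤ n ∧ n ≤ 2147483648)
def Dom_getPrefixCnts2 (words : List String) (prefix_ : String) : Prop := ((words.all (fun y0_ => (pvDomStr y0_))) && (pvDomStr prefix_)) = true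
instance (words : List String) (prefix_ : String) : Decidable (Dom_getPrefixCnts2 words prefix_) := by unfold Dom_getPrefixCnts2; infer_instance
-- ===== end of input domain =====

-- B replaces A's character trie (build + walk) by a single pass that counts the words
-- that are non-empty prefixes of the query (no per-character trie allocation); equal return
-- value on all inputs (no mutation in either).

-- ===== PORT A =====
-- The trie is encoded by the set of its node paths (defaultdict creates one node per
-- prefix of each inserted word; the root is the empty path) together with a dict mapping
-- a node's path to its cnts field (absent = 0).  This is a step-for-step transliteration:
-- insert walks the word creating child nodes, then increments cnts at the final node;
-- getCnts walks the query, breaking at the first missing child, summing child.cnts.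

-- TrieCntTree.insert: the walk 'for w in word: cur = cur.children[w]' (defaultdict creates
-- every visited child node).
def pvInsertNodes (nodes : PySem.Set (List Char)) (path : List Char) : List Char → PySem.Set (List Char)
  | [] => nodes
  | c :: cs => pvInsertNodes (PySem.Set.add nodes (path ++ [c])) (path ++ [c]) cs

-- one tree.insert(w): create the nodes, then 'cur.cnts += 1' at the word's node
def pvInsert (t : PySem.Set (List Char) × PySem.Dict (List Char) Int) (word : String) :
    PySem.Set (List Char) × PySem.Dict (List Char) Int :=
  (pvInsertNodes t.1 [] word.toList, t.2.modify word.toList 0 (· + 1))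

-- TrieCntTree.getCnts: walk the query, break on a missing child, accumulate child.cnts
def pvGetCnts (nodes : PySem.Set (List Char)) (cnts : PySem.Dict (List Char) Int)
    (path : List Char) (chars : List Char) (res : Int) : Int :=
  match chars with
  | [] => res
  | c :: cs =>
    if PySem.Set.contains nodes (path ++ [c]) then
      pvGetCnts nodes cnts (path ++ [c]) cs (res + cnts.getD (path ++ [c]) 0)
    else res

def getPrefixCnts2 (words : List String) (prefix_ : String) : Int :=
  let t := words.foldl pvInsert (PySem.Set.empty, PySem.Dict.empty)
  pvGetCnts t.1 t.2 [] prefix_.toList 0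

-- ===== PORT B =====
def getPrefixCnts2_alt (words : List String) (prefix_ : String) : Int :=
  words.foldl
    (fun total w =>
      if !(w == "") && PySem.Str.startswith prefix_ w then total + 1 else total) 0

-- ===== PRECONDITION & SPEC =====
def Spec_getPrefixCnts2 (words : List String) (prefix_ : String) (out : Int) : Prop := out = getPrefixCnts2_alt words prefix_
instance (words : List String) (prefix_ : String) (out : Int) : Decidable (Spec_getPrefixCnts2 words prefix_ out) := by unfold Spec_getPrefixCnts2; infer_instance

-- ===== CLAIM (what is proved, stated in full; the proofs are below) =====
def Claim_equal_getPrefixCnts2 : Prop := ∀ (words : List String) (prefix_ : String), Dom_getPrefixCnts2 words prefix_ → Spec_getPrefixCnts2 words prefix_ (getPrefixCnts2 words prefix_)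

-- ===== LEMMAS AND PROOFS =====

-- number of words whose characters are exactly p
def pvCntW (words : List String) (p : List Char) : Int := ((words.map String.toList).count p : Int)

-- the counts dict built by the insert loop
lemma pvCnts_getD (words : List String) (a : PySem.Set (List Char))
    (d : PySem.Dict (List Char) Int) (p : List Char) :
    ((words.foldl pvInsert (a, d)).2).getD p 0 = d.getD p 0 + pvCntW words p := by
  induction words generalizing a d with
  | nil => simp [pvCntW]
  | cons w ws ih =>
    rw [List.foldl_cons]
    show ((ws.foldl pvInsert (pvInsertNodes a [] w.toList, d.modify w.toList 0 (· + 1))).2).getD p 0 = _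
    rw [ih, PySem.Dict.getD_modify]
    unfold pvCntW
    rw [List.map_cons, List.count_cons]
    split
    · next heq => simp [heq]; ring
    · next hne => simp [Ne.symm hne]

lemma pvInsertNodes_mem (cs : List Char) (nodes : PySem.Set (List Char)) (path p : List Char) :
    p ∈ pvInsertNodes nodes path cs ↔
      p ∈ nodes ∨ ∃ k, 1 ≤ k ∧ k ≤ cs.length ∧ p = path ++ cs.take k := by
  induction cs generalizing nodes path with
  | nil => simp [pvInsertNodes]
  | cons c cs ih =>
    rw [pvInsertNodes, ih, PySem.Set.mem_add]
    constructor
    · rintro ((h | h) | ⟨k, hk1, hk2, rfl⟩)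
      · exact Or.inl h
      · exact Or.inr ⟨1, by simp [h]⟩
      · exact Or.inr ⟨k + 1, by omega, by simp only [List.length_cons]; omega, by simp [List.take_succ_cons]⟩
    · rintro (h | ⟨k, hk1, hk2, rfl⟩)
      · exact Or.inl (Or.inl h)
      · match k, hk1 with
        | 1, _ => exact Or.inl (Or.inr (by simp))
        | (j+2), _ =>
          exact Or.inr ⟨j + 1, by omega, by simp only [List.length_cons] at hk2; omega, by simp [List.take_succ_cons]⟩

-- the node set built by the insert loop: exactly the nonempty prefixes of inserted words
lemma pvNodes_mem (words : List String) (p : List Char) :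
    (p ∈ (words.foldl pvInsert (PySem.Set.empty, PySem.Dict.empty)).1) ↔
      (p ≠ [] ∧ ∃ w ∈ words, p <+: w.toList) := by
  have h : ∀ (a : PySem.Set (List Char)) (d : PySem.Dict (List Char) Int),
      (p ∈ (words.foldl pvInsert (a, d)).1) ↔
        (p ∈ a ∨ (p ≠ [] ∧ ∃ w ∈ words, p <+: w.toList)) := by
    induction words with
    | nil => simp
    | cons w ws ih =>
      intro a d
      rw [List.foldl_cons]
      show (p ∈ (ws.foldl pvInsert (pvInsertNodes a [] w.toList, _)).1) ↔ _
      rw [ih, pvInsertNodes_mem]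
      constructor
      · rintro ((h | ⟨k, hk1, hk2, rfl⟩) | h)
        · exact Or.inl h
        · refine Or.inr ⟨?_, w, by simp, List.nil_append _ ▸ List.take_prefix _ _⟩
          simp only [List.nil_append]
          exact List.ne_nil_of_length_pos (by simp only [List.length_take]; omega)
        · obtain ⟨hne, v, hv, hpre⟩ := h
          exact Or.inr ⟨hne, v, List.mem_cons_of_mem _ hv, hpre⟩
      · rintro (h | ⟨hne, v, hv, hpre⟩)
        · exact Or.inl (Or.inl h)
        · rcases List.mem_cons.mp hv with rfl | hv
          · refine Or.inl (Or.inr ⟨p.length, ?_, by simpa using hpre.length_le, ?_⟩)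
            · cases p with | nil => exact absurd rfl hne | cons _ _ => simp
            · simpa using (List.prefix_iff_eq_take.mp hpre)
          · exact Or.inr ⟨hne, v, hv, hpre⟩
  rw [h]
  simp

lemma pvCntW_zero_of_no_prefix (words : List String) (p q : List Char)
    (hpq : p <+: q) (h : ¬ ∃ w ∈ words, p <+: w.toList) : pvCntW words q = 0 := by
  unfold pvCntW
  rw [List.count_eq_zero.mpr]
  · rfl
  · intro hq
    rcases List.mem_map.mp hq with ⟨w, hw, hwq⟩
    exact h ⟨w, hw, hwq ▸ hpq⟩

-- the getCnts walk computes the sum of pvCntW over the nonempty prefixes of the query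
lemma pvGetCnts_eq (words : List String) (cs : List Char) (path : List Char) (res : Int) :
    pvGetCnts (words.foldl pvInsert (PySem.Set.empty, PySem.Dict.empty)).1
              (words.foldl pvInsert (PySem.Set.empty, PySem.Dict.empty)).2 path cs res
      = res + ((List.range cs.length).map (fun k => pvCntW words (path ++ cs.take (k + 1)))).sum := by
  induction cs generalizing path res with
  | nil => simp [pvGetCnts]
  | cons c cs ih =>
    rw [pvGetCnts]
    split
    · next hmem =>
      rw [ih, pvCnts_getD]
      rw [List.length_cons, List.range_succ_eq_map]
      simp [List.take_succ_cons, Function.comp_def, List.append_assoc]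
      ring
    · next hmem =>
      have hnot : ¬ ∃ w ∈ words, (path ++ [c]) <+: w.toList := by
        intro hex
        exact hmem (by
          rw [PySem.Set.contains_iff]
          exact (pvNodes_mem words _).mpr ⟨by simp, hex⟩)
      have hz : ∀ k ∈ List.range (c :: cs).length,
          pvCntW words (path ++ (c :: cs).take (k + 1)) = 0 := by
        intro k _
        refine pvCntW_zero_of_no_prefix words (path ++ [c]) _ ?_ hnot
        rw [List.take_succ_cons, show path ++ c :: cs.take k = (path ++ [c]) ++ cs.take k by simp]
        exact List.prefix_append _ _
      rw [List.map_eq_map_iff.mpr (fun k hk => hz k hk)]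
      simp

-- the indicator of 'l is a nonempty prefix of cs of length ≤ m', summed over k < m
lemma pvIndicator_sum (cs l : List Char) (m : Nat) (hm : m ≤ cs.length) :
    ((List.range m).map (fun k => if cs.take (k + 1) = l then (1 : Int) else 0)).sum
      = if l ≠ [] ∧ l <+: cs ∧ l.length ≤ m then 1 else 0 := by
  induction m with
  | zero =>
    simp only [List.range_zero, List.map_nil, List.sum_nil]
    rw [if_neg]
    rintro ⟨hne, -, hlen⟩
    exact hne (List.eq_nil_of_length_eq_zero (Nat.le_zero.mp hlen))
  | succ m ih =>
    rw [List.range_succ, List.map_append, List.sum_append]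
    rw [ih (by omega)]
    simp only [List.map_cons, List.map_nil, List.sum_cons, List.sum_nil, add_zero]
    by_cases heq : cs.take (m + 1) = l
    · rw [if_pos heq]
      have hlen : l.length = m + 1 := by
        rw [← heq, List.length_take]; omega
      rw [if_neg (by rintro ⟨-, -, h⟩; omega), if_pos ?_]
      · ring
      · refine ⟨?_, heq ▸ List.take_prefix _ _, by omega⟩
        exact List.ne_nil_of_length_pos (by omega)
    · rw [if_neg heq, add_zero]
      by_cases hc : l ≠ [] ∧ l <+: cs ∧ l.length ≤ m
      · rw [if_pos hc, if_pos ⟨hc.1, hc.2.1, by omega⟩]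
      · rw [if_neg hc, if_neg]
        rintro ⟨hne, hpre, hlen⟩
        rcases Nat.lt_or_ge l.length (m + 1) with hlt | hge
        · exact hc ⟨hne, hpre, by omega⟩
        · have : l.length = m + 1 := by omega
          exact heq (by rw [← this]; exact (List.prefix_iff_eq_take.mp hpre).symm)

-- summing the word counts over all nonempty prefixes of cs counts the words that are
-- nonempty prefixes of cs
lemma pvSum_count_eq_countP (ws : List (List Char)) (cs : List Char) :
    ((List.range cs.length).map (fun k => (ws.count (cs.take (k + 1)) : Int))).sum
      = (ws.countP (fun l => !l.isEmpty && PySem.Chars.startswith cs l) : Int) := by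
  induction ws with
  | nil => simp
  | cons a ws ih =>
    have hsplit : ∀ k : Nat, ((a :: ws).count (cs.take (k + 1)) : Int)
        = (ws.count (cs.take (k + 1)) : Int)
          + (if cs.take (k + 1) = a then (1 : Int) else 0) := by
      intro k
      rw [List.count_cons]
      push_cast
      congr 1
      split
      · next h => rw [if_pos (beq_iff_eq.mp h).symm]
      · next h => rw [if_neg (fun hh => h (beq_iff_eq.mpr hh.symm))]
    calc ((List.range cs.length).map (fun k => ((a :: ws).count (cs.take (k + 1)) : Int))).sum
        = ((List.range cs.length).map (fun k => (ws.count (cs.take (k + 1)) : Int)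
            + (if cs.take (k + 1) = a then (1 : Int) else 0))).sum := by
          exact congrArg List.sum (List.map_congr_left (fun k _ => hsplit k))
      _ = ((List.range cs.length).map (fun k => (ws.count (cs.take (k + 1)) : Int))).sum
            + ((List.range cs.length).map (fun k => if cs.take (k + 1) = a then (1 : Int) else 0)).sum := by
          rw [← List.sum_map_add]
      _ = _ := by
          rw [ih, pvIndicator_sum cs a cs.length le_rfl, List.countP_cons]
          by_cases h : a ≠ [] ∧ a <+: cs
          · rw [if_pos ⟨h.1, h.2, h.2.length_le⟩]
            have : (!a.isEmpty && PySem.Chars.startswith cs a) = true := by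
              rw [Bool.and_eq_true, PySem.Chars.startswith_iff]
              exact ⟨by simpa [List.isEmpty_iff] using h.1, h.2⟩
            rw [this]
            simp [add_comm]
          · rw [if_neg (fun hh => h ⟨hh.1, hh.2.1⟩)]
            have : (!a.isEmpty && PySem.Chars.startswith cs a) = false := by
              rw [Bool.and_eq_false_iff]
              by_cases ha : a = []
              · exact Or.inl (by simp [ha])
              · refine Or.inr ?_
                rw [Bool.eq_false_iff]
                intro htrue
                exact h ⟨ha, (PySem.Chars.startswith_iff _ _).mp htrue⟩
            rw [this]
            simp

-- B's one-pass scan counts the words that are nonempty prefixes of the query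
lemma pvAlt_eq (words : List String) (prefix_ : String) :
    getPrefixCnts2_alt words prefix_
      = ((List.range prefix_.toList.length).map
          (fun k => pvCntW words (prefix_.toList.take (k + 1)))).sum := by
  unfold getPrefixCnts2_alt
  rw [PySem.List.foldl_if_add_one, zero_add]
  have hmap : words.countP (fun w => !(w == "") && PySem.Str.startswith prefix_ w)
      = (words.map String.toList).countP
          (fun l => !l.isEmpty && PySem.Chars.startswith prefix_.toList l) := by
    rw [List.countP_map]
    refine List.countP_congr (fun w _ => ?_)
    show (!(w == "") && PySem.Str.startswith prefix_ w) = true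
        ↔ (!w.toList.isEmpty && PySem.Chars.startswith prefix_.toList w.toList) = true
    rw [Bool.and_eq_true, Bool.and_eq_true, Bool.not_eq_true', Bool.not_eq_true',
        beq_eq_false_iff_ne, List.isEmpty_eq_false_iff,
        show PySem.Str.startswith prefix_ w
            = PySem.Chars.startswith prefix_.toList w.toList by simp [PySem.Str.startswith]]
    constructor
    · rintro ⟨h1, h2⟩
      exact ⟨fun hl => h1 (String.toList_eq_nil_iff.mp hl), h2⟩
    · rintro ⟨h1, h2⟩
      exact ⟨fun he => h1 (by simp [he]), h2⟩
  rw [hmap, ← pvSum_count_eq_countP]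
  rfl

-- ===== VERDICT (by name: the statement is the Claim_ definition above) =====
theorem getPrefixCnts2_spec : Claim_equal_getPrefixCnts2 := by
  intro words prefix_ _
  show getPrefixCnts2 words prefix_ = getPrefixCnts2_alt words prefix_
  rw [pvAlt_eq]
  unfold getPrefixCnts2
  rw [pvGetCnts_eq]
  simp
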